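-- pv_equiv track=rewrite | github.com/cgohlke/liffile | setup.py | fix_docstring_examples
-- ===== SOURCE A (Python) =====
-- def fix_docstring_examples(docstring: str) -> str:
--     """Return docstring with examples fixed for GitHub."""
--     start = True
--     indent = False
--     lines = ['..', '  This file is generated by setup.py', '']
--     for line in docstring.splitlines():
--         if not line.strip():
--             start = True
--             indent = False
--         if line.startswith('>>> '):
--             indent = True
--             if start:
--                 lines.extend(['.. code-block:: python', ''])
--                 start = False
--         lines.append(('    ' if indent else '') + line)
--     return '\n'.join(lines)
-- ===== SOURCE B (Python) =====
-- def fix_docstring_examples(docstring: str) -> str: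
--     """Return docstring with examples fixed for GitHub."""
--
--     def flush(p):
--         # emit a paragraph: unindented up to the first '>>> ' line, then the
--         # code-block header and the rest indented by four spaces
--         for i, ln in enumerate(p):
--             if ln.startswith('>>> '):
--                 return p[:i] + ['.. code-block:: python', ''] + [
--                     '    ' + x for x in p[i:]
--                 ]
--         return p
--
--     out = ['..', '  This file is generated by setup.py', '']
--     para = []
--     for line in docstring.splitlines():
--         if not line.strip():
--             out += flush(para) + [line]
--             para = []
--         else:
--             para.append(line)
--     return '\n'.join(out + flush(para))
-- ===== Notes on version B (the rewrite author's own statement) =====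
-- stated objective: alternative
-- what changed: Replaces A's start/indent boolean flag machine with a paragraph-based decomposition: lines are buffered into blank-delimited paragraphs and each paragraph is rendered at once (unindented prefix up to the first '>>> ' line, then the code-block header, then the rest indented).
import Mathlib
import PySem

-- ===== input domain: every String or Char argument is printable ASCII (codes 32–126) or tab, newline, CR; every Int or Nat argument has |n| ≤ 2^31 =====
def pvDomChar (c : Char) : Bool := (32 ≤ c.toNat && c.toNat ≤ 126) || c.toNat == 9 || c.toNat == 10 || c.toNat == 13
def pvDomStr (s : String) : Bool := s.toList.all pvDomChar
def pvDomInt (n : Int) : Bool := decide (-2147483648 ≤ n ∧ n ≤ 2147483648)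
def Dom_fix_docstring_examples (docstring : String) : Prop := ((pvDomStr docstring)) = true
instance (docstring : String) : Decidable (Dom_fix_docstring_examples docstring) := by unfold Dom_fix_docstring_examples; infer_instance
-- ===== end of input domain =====

-- B replaces A's start/indent boolean flag machine with a paragraph-based decomposition (same cost).

-- shared tests: `not line.strip()` and `line.startswith('>>> ')`
def pvBlank (l : List Char) : Bool := PySem.Chars.strip l == []
def pvPS (l : List Char) : Bool := PySem.Chars.startswith l ">>> ".toList

-- ===== PORT A =====
-- the fixed three-line header prepended by both versions
def pvHeader : List (List Char) :=
  ["..".toList, "  This file is generated by setup.py".toList, []]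

-- one iteration of A's for-loop: state = (start, indent, lines)
def pvStepA (st : Bool × Bool × List (List Char)) (line : List Char) :
    Bool × Bool × List (List Char) :=
  let start := if pvBlank line then true else st.1
  let indent := if pvBlank line then false else st.2.1
  if pvPS line then
    if start then
      (false, true, st.2.2 ++ [".. code-block:: python".toList, [], "    ".toList ++ line])
    else
      (start, true, st.2.2 ++ ["    ".toList ++ line])
  else
    (start, indent, st.2.2 ++ [(if indent then "    ".toList else []) ++ line])

def fix_docstring_examples (docstring : String) : String :=
  String.ofList (PySem.Chars.join ['\n']
    (((PySem.Chars.splitlines docstring.toList).foldl pvStepA (true, false, pvHeader)).2.2))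

-- ===== PORT B =====
-- render one paragraph: unindented prefix up to the first '>>> ' line, then the
-- code-block header and the rest indented by four spaces
def pvFlush : List (List Char) → List (List Char)
  | [] => []
  | l :: rest =>
    if pvPS l then
      ".. code-block:: python".toList :: [] :: (l :: rest).map (fun x => "    ".toList ++ x)
    else l :: pvFlush rest

-- one iteration of B's for-loop: state = (out, para)
def pvStepB (st : List (List Char) × List (List Char)) (line : List Char) :
    List (List Char) × List (List Char) :=
  if pvBlank line then (st.1 ++ pvFlush st.2 ++ [line], [])
  else (st.1, st.2 ++ [line])

def fix_docstring_examples_alt (docstring : String) : String :=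
  let r := (PySem.Chars.splitlines docstring.toList).foldl pvStepB (pvHeader, [])
  String.ofList (PySem.Chars.join ['\n'] (r.1 ++ pvFlush r.2))

-- ===== PRECONDITION & SPEC =====
def Spec_fix_docstring_examples (docstring : String) (out : String) : Prop := out = fix_docstring_examples_alt docstring
instance (docstring : String) (out : String) : Decidable (Spec_fix_docstring_examples docstring out) := by unfold Spec_fix_docstring_examples; infer_instance

-- ===== CLAIM (what is proved, stated in full; the proofs are below) =====
def Claim_equal_fix_docstring_examples : Prop := ∀ (docstring : String), Dom_fix_docstring_examples docstring → Spec_fix_docstring_examples docstring (fix_docstring_examples docstring)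

-- ===== LEMMAS AND PROOFS =====

-- a blank (whitespace-only) line cannot start with '>>> '
theorem pvPS_of_blank (l : List Char) (h : pvBlank l = true) : pvPS l = false := by
  by_contra hb
  have hs : ">>> ".toList <+: l := by
    apply (PySem.Chars.startswith_iff _ _).mp
    revert hb; unfold pvPS; cases PySem.Chars.startswith l ">>> ".toList <;> simp
  obtain ⟨t, ht⟩ := hs
  subst ht
  simp [pvBlank, PySem.Chars.strip, PySem.Chars.lstrip, PySem.Chars.rstrip,
    PySem.Chars.isspace] at h
  have h2 := h '>' (by simp)
  simp [Char.toNat] at h2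

-- flushing distributes over append when no line of the prefix starts with '>>> '
theorem pvFlush_append_of_none (xs ys : List (List Char))
    (h : xs.any pvPS = false) :
    pvFlush (xs ++ ys) = xs ++ pvFlush ys := by
  induction xs with
  | nil => simp
  | cons a xs ih =>
    simp only [List.any_cons, Bool.or_eq_false_iff] at h
    simp [pvFlush, h.1, ih h.2]

-- a paragraph with no '>>> ' line is emitted as is
theorem pvFlush_of_none (xs : List (List Char)) (h : xs.any pvPS = false) :
    pvFlush xs = xs := by
  simpa [pvFlush] using pvFlush_append_of_none xs [] h

-- once a '>>> ' line is inside, every appended line is emitted indented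
theorem pvFlush_append_of_some (xs ys : List (List Char))
    (h : xs.any pvPS = true) :
    pvFlush (xs ++ ys) = pvFlush xs ++ ys.map (fun x => "    ".toList ++ x) := by
  induction xs with
  | nil => simp at h
  | cons a xs ih =>
    by_cases ha : pvPS a = true
    · simp [pvFlush, ha]
    · simp only [List.any_cons, Bool.or_eq_true] at h
      rcases h with h | h
      · exact absurd h ha
      · have ha' : pvPS a = false := by revert ha; cases pvPS a <;> simp
        simp [pvFlush, ha', ih h]

-- loop invariant: A's line list equals B's emitted list plus the flush of the pending paragraph
theorem pv_inv (ls : List (List Char)) : ∀ (out para : List (List Char)),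
    ((ls.foldl pvStepA (!(para.any pvPS), para.any pvPS, out ++ pvFlush para)).2.2)
    = (ls.foldl pvStepB (out, para)).1 ++ pvFlush (ls.foldl pvStepB (out, para)).2 := by
  induction ls with
  | nil => intro out para; simp
  | cons l ls ih =>
    intro out para
    simp only [List.foldl_cons]
    by_cases hb : pvBlank l = true
    · have hf := pvPS_of_blank l hb
      have hA : pvStepA (!(para.any pvPS), para.any pvPS, out ++ pvFlush para) l
          = (true, false, (out ++ pvFlush para ++ [l]) ++ pvFlush []) := by
        simp [pvStepA, hb, hf, pvFlush]
      have hB : pvStepB (out, para) l = (out ++ pvFlush para ++ [l], []) := by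
        simp [pvStepB, hb]
      rw [hA, hB]
      simpa [pvFlush] using ih (out ++ pvFlush para ++ [l]) []
    · have hb' : pvBlank l = false := by revert hb; cases pvBlank l <;> simp
      have key : pvStepA (!(para.any pvPS), para.any pvPS, out ++ pvFlush para) l
          = (!((para ++ [l]).any pvPS), (para ++ [l]).any pvPS,
             out ++ pvFlush (para ++ [l])) := by
        by_cases hf : pvPS l = true
        · by_cases hp : para.any pvPS = true
          · simp [pvStepA, hb', hf, hp, pvFlush_append_of_some _ _ hp]
          · have hp' : para.any pvPS = false := by revert hp; cases para.any pvPS <;> simp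
            simp [pvStepA, hb', hf, hp', pvFlush_append_of_none _ _ hp', pvFlush_of_none _ hp', pvFlush]
        · have hf' : pvPS l = false := by revert hf; cases pvPS l <;> simp
          by_cases hp : para.any pvPS = true
          · simp [pvStepA, hb', hf', hp, pvFlush_append_of_some _ _ hp]
          · have hp' : para.any pvPS = false := by revert hp; cases para.any pvPS <;> simp
            simp [pvStepA, hb', hf', hp', pvFlush_append_of_none _ _ hp', pvFlush_of_none _ hp', pvFlush]
      have hB : pvStepB (out, para) l = (out, para ++ [l]) := by
        simp [pvStepB, hb']
      rw [key, hB]; exact ih out (para ++ [l])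

-- ===== VERDICT (by name: the statement is the Claim_ definition above) =====
theorem fix_docstring_examples_spec : Claim_equal_fix_docstring_examples := by
  intro docstring _
  unfold Spec_fix_docstring_examples fix_docstring_examples fix_docstring_examples_alt
  have := pv_inv (PySem.Chars.splitlines docstring.toList) pvHeader []
  simp only [pvFlush, List.any_nil, Bool.not_false, List.append_nil] at this
  rw [this]
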